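-- pv_equiv track=rewrite | github.com/GautamiGM/NJIT | hw1.py | shortseq
-- ===== SOURCE A (Python) =====
-- def shortseq(seq):
--     max = 10
--     shortest = ""
--     for x in seq:
--         if len(x) < max:
--             max = len(x)
--             shortest = x
--     return shortest
-- ===== SOURCE B (Python) =====
-- def shortseq(seq):
--     cands = [x for x in seq if len(x) < 10]
--     return min(cands, key=len, default="")
-- ===== Notes on version B (the rewrite author's own statement) =====
-- stated objective: simpler
-- what changed: Replaces the manual running-minimum loop with threshold-seeded tracking state by a filter comprehension (len < 10) followed by min(..., key=len, default='').
import Mathlib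
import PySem

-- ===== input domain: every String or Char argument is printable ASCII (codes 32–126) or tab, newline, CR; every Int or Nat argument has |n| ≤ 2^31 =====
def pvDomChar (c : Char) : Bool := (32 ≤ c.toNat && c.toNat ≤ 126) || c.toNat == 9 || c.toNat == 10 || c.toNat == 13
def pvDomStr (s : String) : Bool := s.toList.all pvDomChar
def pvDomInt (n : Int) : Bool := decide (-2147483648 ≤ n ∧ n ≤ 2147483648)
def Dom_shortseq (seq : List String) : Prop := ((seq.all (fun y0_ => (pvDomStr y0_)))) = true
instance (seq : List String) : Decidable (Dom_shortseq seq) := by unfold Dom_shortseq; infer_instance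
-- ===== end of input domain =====

-- B replaces A's single running-minimum loop (threshold 10 seeded into the tracking state)
-- by a filter pass (len < 10) followed by a first-minimum reduction with default "" — simpler decomposition, same O(n) cost.


-- ===== PORT A =====
def shortseq (seq : List String) : String :=
  (seq.foldl
    (fun (st : Int × String) x =>
      if PySem.Str.len x < st.1 then (PySem.Str.len x, x) else st)
    (10, "")).2

-- ===== PORT B =====
def shortseq_alt (seq : List String) : String :=
  let cands := seq.filter (fun x => decide (PySem.Str.len x < 10))
  match PySem.List.min? cands PySem.Str.len with
  | some m => m
  | none => ""

-- ===== PRECONDITION & SPEC =====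
def Spec_shortseq (seq : List String) (out : String) : Prop := out = shortseq_alt seq
instance (seq : List String) (out : String) : Decidable (Spec_shortseq seq out) := by unfold Spec_shortseq; infer_instance

-- ===== CLAIM (what is proved, stated in full; the proofs are below) =====
def Claim_equal_shortseq : Prop := ∀ (seq : List String), Dom_shortseq seq → Spec_shortseq seq (shortseq seq)

-- ===== LEMMAS AND PROOFS =====

-- A's loop step and B's (filter + min?) step, named for the invariant proof.
def pvStepA (st : Int × String) (x : String) : Int × String :=
  if PySem.Str.len x < st.1 then (PySem.Str.len x, x) else st

def pvStepB (o : Option String) (x : String) : Option String :=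
  if PySem.Str.len x < 10 then
    match o with
    | none => some x
    | some m => if PySem.Str.len x < PySem.Str.len m then some x else some m
  else o

-- The state correspondence: A's (m, s) pair vs B's optional current minimum.
def pvRel (m : Int) (s : String) (o : Option String) : Prop :=
  (o = none ∧ m = 10 ∧ s = "") ∨ (o = some s ∧ m = PySem.Str.len s ∧ m < 10)

lemma pvRel_step (m : Int) (s : String) (o : Option String) (x : String)
    (h : pvRel m s o) :
    pvRel (pvStepA (m, s) x).1 (pvStepA (m, s) x).2 (pvStepB o x) := by
  rcases h with ⟨ho, hm, hs⟩ | ⟨ho, hm, hlt⟩ <;> subst ho <;>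
    simp only [pvStepA, pvStepB, pvRel] <;> split_ifs with h1 h2 <;>
    simp_all <;> omega

lemma pvRel_foldl (seq : List String) :
    ∀ (m : Int) (s : String) (o : Option String), pvRel m s o →
    pvRel (seq.foldl pvStepA (m, s)).1 (seq.foldl pvStepA (m, s)).2
      (seq.foldl pvStepB o) := by
  induction seq with
  | nil => intro m s o h; simpa using h
  | cons x t ih =>
      intro m s o h
      simpa using ih (pvStepA (m, s) x).1 (pvStepA (m, s) x).2 (pvStepB o x)
        (by simpa using pvRel_step m s o x h)

lemma minFiltered_eq_foldl (seq : List String) :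
    PySem.List.min? (seq.filter (fun x => decide (PySem.Str.len x < 10)))
      PySem.Str.len = seq.foldl pvStepB none := by
  simp only [PySem.List.min?, List.foldl_filter]
  congr 1
  funext o x
  simp only [pvStepB, decide_eq_true_eq]
  split_ifs <;> cases o <;> rfl

-- ===== VERDICT (by name: the statement is the Claim_ definition above) =====
theorem shortseq_spec : Claim_equal_shortseq := by
  intro seq _
  unfold Spec_shortseq shortseq shortseq_alt
  simp only []
  rw [minFiltered_eq_foldl]
  have h := pvRel_foldl seq 10 "" none (Or.inl ⟨rfl, rfl, rfl⟩)
  have hfold : (fun (st : Int × String) x =>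
      if PySem.Str.len x < st.1 then (PySem.Str.len x, x) else st) = pvStepA := by
    funext st x; cases st; rfl
  rw [hfold]
  rcases h with ⟨ho, _, hs⟩ | ⟨ho, _, _⟩ <;> rw [ho] <;> simp [hs]
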